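-- pv_equiv track=rewrite | github.com/cka304huk-m/my_teaching | 8/tasks/8.13.py | uncirculated_numbers
-- ===== SOURCE A (Python) =====
-- def uncirculated_numbers(pb):
--     """1О наименее распространенных чисел, упорядоченных по частоте."""
--
--     # Испортированный список с числами.
--     list_pb = pb
--
--     # Список для чисел
--     num_list = []
--
--     # Сколько раз число из num_list повторяется.
--     coun_list = []
--
--     # Перебираю испортированый список.
--     for p in sorted(list_pb):
--         if p not in num_list:
--             num_list.append(p)
--             coun_list.append(list_pb.count(p))
--
--     # Списки для упорядочевания чисел.
--     num_list2 = []
--     coun_list2 = []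
--
--     # Индекс минимального числа.
--     index_count = 0
--
--     # Ищу в списке coun_list минимальное число
--     # это повторения числа в списке.
--
--     # Цикл работает пока длина списка coun_list не
--     # будет равна 0.
--     while len(coun_list) != 0:
--
--         # Нахожу индекс минимального числа.
--         index_count = coun_list.index(min(coun_list))
--
--         # Записываю в новый список число с
--         # наименьшим количеством повторений.
--         num_list2.append(num_list[index_count])
--
--         # Записываю в новый список количество
--         # повторений числа с наименьшим повторением.
--         coun_list2.append(coun_list[index_count])
--
--         # Удаляю числа по индексу из старых списков.
--         del num_list[index_count]
--         del coun_list[index_count]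
--
--     # Возвращаю первые 10 чисел.
--     return num_list2[:10], coun_list2[:10]
-- ===== SOURCE B (Python) =====
-- def uncirculated_numbers(pb):
--     """10 least common numbers ordered by frequency (count asc, ties value asc)."""
--     cnt = {}
--     for p in pb:
--         cnt[p] = cnt.get(p, 0) + 1
--     items = sorted(cnt.items(), key=lambda kv: (kv[1], kv[0]))[:10]
--     return [kv[0] for kv in items], [kv[1] for kv in items]
-- ===== Notes on version B (the rewrite author's own statement) =====
-- stated objective: faster
-- what changed: Replaces A's per-distinct-value list.count scans and its repeated min+index+del selection loop with a single dict frequency pass and one sort keyed by (count, value).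
import Mathlib
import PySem

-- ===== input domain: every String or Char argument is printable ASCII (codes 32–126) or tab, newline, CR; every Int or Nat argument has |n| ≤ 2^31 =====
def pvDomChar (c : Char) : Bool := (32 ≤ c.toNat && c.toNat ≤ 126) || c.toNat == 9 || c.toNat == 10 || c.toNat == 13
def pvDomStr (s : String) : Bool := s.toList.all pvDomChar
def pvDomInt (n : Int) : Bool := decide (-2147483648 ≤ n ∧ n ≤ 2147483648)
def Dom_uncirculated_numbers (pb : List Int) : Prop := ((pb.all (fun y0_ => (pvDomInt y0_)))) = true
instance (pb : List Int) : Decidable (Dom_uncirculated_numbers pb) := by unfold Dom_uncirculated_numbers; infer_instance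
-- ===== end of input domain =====

-- B replaces A's per-value list.count scans and its repeated min+index+del selection loop by one
-- counting pass and a single (count, value)-keyed sort; objective: faster.

-- ===== PORT A =====
-- A's while-loop: repeatedly move the entry with the first minimal count to the output lists.
-- The getD defaults are never taken here: min exists (list nonempty) and list.index is in range.
def uncSelLoop (numL counL num2 coun2 : List Int) : List Int × List Int :=
  if _h : counL.length ≠ 0 then
    let m := (PySem.List.min? counL (fun x => x)).getD 0
    let i := (PySem.List.index? counL m).getD 0
    uncSelLoop (numL.eraseIdx i) (counL.eraseIdx i)
      (num2 ++ [numL.getD i 0]) (coun2 ++ [counL.getD i 0])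
  else (num2, coun2)
termination_by counL.length
decreasing_by
  have hi : (PySem.List.index? counL ((PySem.List.min? counL (fun x => x)).getD 0)).getD 0
      < counL.length := by
    rcases ho : PySem.List.index? counL ((PySem.List.min? counL (fun x => x)).getD 0) with _ | k
    · simp only [Option.getD_none]; omega
    · obtain ⟨hk, -, -⟩ := PySem.List.getElem_of_index?_eq_some ho
      simpa using hk
  simp only [List.length_eraseIdx, hi, if_pos]
  omega

def uncirculated_numbers (pb : List Int) : List Int × List Int :=
  let st := (PySem.List.sorted pb (fun x => x)).foldl
      (fun (s : List Int × List Int) p =>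
        if p ∈ s.1 then s else (s.1 ++ [p], s.2 ++ [((PySem.List.count pb p : Nat) : Int)]))
      ([], [])
  let r := uncSelLoop st.1 st.2 [] []
  (PySem.List.slice r.1 none (some 10), PySem.List.slice r.2 none (some 10))

-- ===== PORT B =====
def uncirculated_numbers_alt (pb : List Int) : List Int × List Int :=
  let cnt : PySem.Dict Int Int :=
    pb.foldl (fun d p => d.insert p (d.getD p 0 + 1)) PySem.Dict.empty
  let items := PySem.List.slice
    (PySem.List.sorted2 cnt.items (fun kv => kv.2) (fun kv => kv.1)) none (some 10)
  (items.map (fun kv => kv.1), items.map (fun kv => kv.2))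

-- ===== PRECONDITION & SPEC =====
def Spec_uncirculated_numbers (pb : List Int) (out : List Int × List Int) : Prop := out = uncirculated_numbers_alt pb
instance (pb : List Int) (out : List Int × List Int) : Decidable (Spec_uncirculated_numbers pb out) := by unfold Spec_uncirculated_numbers; infer_instance

-- ===== CLAIM (what is proved, stated in full; the proofs are below) =====
def Claim_equal_uncirculated_numbers : Prop := ∀ (pb : List Int), Dom_uncirculated_numbers pb → Spec_uncirculated_numbers pb (uncirculated_numbers pb)

-- ===== LEMMAS AND PROOFS =====
-- Sort key shared by both characterisations: (count, value), lexicographically.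
def uncLexKey (x : Int × Int) : Lex (Int × Int) := toLex (x.2, x.1)

theorem unc_sorted2_eq (xs : List (Int × Int)) :
    PySem.List.sorted2 xs (fun kv => kv.2) (fun kv => kv.1)
      = PySem.List.sorted xs uncLexKey := by
  have hb : (fun (a b : Int × Int) => decide (a.2 < b.2) || (!decide (b.2 < a.2) && decide (a.1 < b.1)))
      = fun a b => decide (uncLexKey a < uncLexKey b) := by
    funext a b
    by_cases h1 : a.2 < b.2
    · simp [h1, uncLexKey, Prod.Lex.lt_iff, not_lt.mpr h1.le]
    · by_cases h2 : b.2 < a.2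
      · simp [h1, h2, uncLexKey, Prod.Lex.lt_iff, ne_of_gt h2]
      · have he : a.2 = b.2 := le_antisymm (not_lt.mp h2) (not_lt.mp h1)
        simp [he, uncLexKey, Prod.Lex.lt_iff]
  simp only [PySem.List.sorted2, PySem.List.sorted, Bool.false_eq_true, if_false, hb]

theorem unc_slice10 {α : Type} (xs : List α) : PySem.List.slice xs none (some 10) = xs.take 10 := by
  have h := PySem.List.slice_to_natCast xs 10
  simpa using h

theorem unc_phase1 (c : Int → Int) (l : List Int) : ∀ (ns : List Int),
    l.foldl (fun (s : List Int × List Int) p =>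
        if p ∈ s.1 then s else (s.1 ++ [p], s.2 ++ [c p])) (ns, ns.map c)
      = (l.foldl PySem.Set.add ns, (l.foldl PySem.Set.add ns).map c) := by
  induction l with
  | nil => intro ns; rfl
  | cons p l ih =>
    intro ns
    simp only [List.foldl_cons]
    by_cases hp : p ∈ ns
    · have ha : PySem.Set.add ns p = ns := by
        simp [PySem.Set.add, PySem.Set.contains, hp]
      rw [if_pos hp, ha, ih]
    · have ha : PySem.Set.add ns p = ns ++ [p] := by
        simp [PySem.Set.add, PySem.Set.contains, hp]
      rw [if_neg hp, ha]
      have h2 : ns.map c ++ [c p] = (ns ++ [p]).map c := by simp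
      rw [h2, ih]

theorem unc_foldl_add_sublist (l : List Int) : ∀ (acc : List Int),
    ∃ t, t.Sublist l ∧ l.foldl PySem.Set.add acc = acc ++ t := by
  induction l with
  | nil => intro acc; exact ⟨[], List.Sublist.refl _, by simp⟩
  | cons p l ih =>
    intro acc
    simp only [List.foldl_cons]
    by_cases hp : PySem.Set.contains acc p
    all_goals simp only [PySem.Set.contains, List.contains_eq_mem, decide_eq_true_eq] at hp
    · have ha : PySem.Set.add acc p = acc := by simp [PySem.Set.add, PySem.Set.contains, hp]
      obtain ⟨t, hs, he⟩ := ih acc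
      exact ⟨t, hs.cons p, by rw [ha]; exact he⟩
    · have ha : PySem.Set.add acc p = acc ++ [p] := by simp [PySem.Set.add, PySem.Set.contains, hp]
      obtain ⟨t, hs, he⟩ := ih (acc ++ [p])
      exact ⟨p :: t, hs.cons₂ p, by rw [ha]; simpa using he⟩

theorem unc_pairwise_lt_of_le_nodup {l : List (Int × Int)}
    (hle : l.Pairwise (fun a b => uncLexKey a ≤ uncLexKey b))
    (hnd : (l.map uncLexKey).Nodup) :
    l.Pairwise (fun a b => uncLexKey a < uncLexKey b) := by
  have hne : l.Pairwise (fun a b => uncLexKey a ≠ uncLexKey b) := List.pairwise_map.mp hnd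
  exact (hle.and hne).imp (fun h => lt_of_le_of_ne h.1 h.2)

theorem unc_lexkey_inj : Function.Injective uncLexKey := by
  intro a b h
  have h2 := congrArg ofLex h
  simp only [uncLexKey, ofLex_toLex, Prod.mk.injEq] at h2
  exact Prod.ext h2.2 h2.1

theorem unc_perm_eraseIdx {α : Type} (l : List α) (i : Nat) (hi : i < l.length) :
    l.Perm (l[i] :: l.eraseIdx i) := by
  conv_lhs => rw [← List.take_append_drop i l, ← List.getElem_cons_drop hi]
  rw [List.eraseIdx_eq_take_drop_succ]
  exact List.perm_middle

theorem unc_sel_spec (c : Int → Int) : ∀ (n : Nat) (N : List Int), N.length = n →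
    N.Pairwise (· < ·) → ∀ a1 a2,
    uncSelLoop N (N.map c) a1 a2
      = (a1 ++ (PySem.List.sorted (N.map fun v => (v, c v)) uncLexKey).map Prod.fst,
         a2 ++ (PySem.List.sorted (N.map fun v => (v, c v)) uncLexKey).map Prod.snd) := by
  intro n
  induction n using Nat.strong_induction_on with
  | _ n ih =>
    intro N hlen hpw a1 a2
    rcases Nat.eq_zero_or_pos n with hz | hpos
    · subst hz
      have hN : N = [] := List.length_eq_zero_iff.mp hlen
      subst hN
      rw [uncSelLoop]
      simp [PySem.List.sorted]
    · have hNne : N ≠ [] := by intro h; subst h; simp at hlen; omega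
      have hcne : (N.map c).length ≠ 0 := by simp [List.length_map]; omega
      -- the min exists
      rcases hm : PySem.List.min? (N.map c) (fun x => x) with _ | m
      · exact absurd ((PySem.List.min?_eq_none_iff _ _).mp hm) (by simp [hNne])
      have hmem : m ∈ N.map c := PySem.List.min?_mem hm
      rcases hidx : PySem.List.index? (N.map c) m with _ | i
      · exact absurd hidx (by
          have := (PySem.List.index?_isSome_iff (N.map c) m).mpr hmem
          intro h; rw [h] at this; simp at this)
      obtain ⟨hi, hEi, hFirst⟩ := PySem.List.getElem_of_index?_eq_some hidx
      have hiN : i < N.length := by simpa using hi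
      -- one step of the loop
      rw [uncSelLoop]
      rw [dif_pos hcne]
      simp only [hm, hidx, Option.getD_some]
      have hcNi : c N[i] = m := by simpa using hEi
      have hgN : N.getD i 0 = N[i] := List.getD_eq_getElem N 0 hiN
      have hgC : (N.map c).getD i 0 = m := by
        rw [List.getD_eq_getElem _ 0 hi, hEi]
      have hErase : (N.map c).eraseIdx i = (N.eraseIdx i).map c := List.eraseIdx_map c N i
      have hpw' : (N.eraseIdx i).Pairwise (· < ·) :=
        List.Pairwise.sublist (List.eraseIdx_sublist N i) hpw
      have hlen' : (N.eraseIdx i).length = n - 1 := by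
        rw [List.length_eraseIdx]; simp [hiN]; omega
      rw [hErase, ih (n-1) (by omega) _ hlen' hpw']
      -- characterise the head of the sorted list
      have hndN : N.Nodup := hpw.imp ne_of_lt
      have hsort : PySem.List.sorted (N.map fun v => (v, c v)) uncLexKey
          = (N[i], m) :: PySem.List.sorted ((N.eraseIdx i).map fun v => (v, c v)) uncLexKey := by
        apply PySem.List.sorted_eq_of_perm_of_pairwise_lt
        · -- permutation
          have hiX : i < (N.map fun v => (v, c v)).length := by simpa using hiN
          have hXi : (N.map fun v => (v, c v))[i] = (N[i], m) := by
            simp [hcNi]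
          have hX'e : (N.map fun v => (v, c v)).eraseIdx i
              = (N.eraseIdx i).map fun v => (v, c v) := List.eraseIdx_map _ N i
          have h1 := (unc_perm_eraseIdx (N.map fun v => (v, c v)) i hiX).symm
          rw [hXi, hX'e] at h1
          exact (List.Perm.cons _ (PySem.List.sorted_perm _ _ _)).trans h1
        · -- strict pairwise
          apply List.pairwise_cons.mpr
          constructor
          · intro y hy
            rw [PySem.List.mem_sorted] at hy
            obtain ⟨w, hw, rfl⟩ := List.mem_map.mp hy
            have hwN : w ∈ N := (List.eraseIdx_sublist N i).mem hw
            have hmle : m ≤ c w := PySem.List.min?_isMin hm (c w) (List.mem_map_of_mem hwN)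
            by_cases hlt : m < c w
            · simp [uncLexKey, Prod.Lex.lt_iff]; left; exact hlt
            · have heq : m = c w := le_antisymm hmle (not_lt.mp hlt)
              have hvlt : N[i] < w := by
                rw [List.eraseIdx_eq_take_drop_succ] at hw
                rcases List.mem_append.mp hw with hw' | hw'
                · exfalso
                  obtain ⟨j, hj, hjw⟩ := List.getElem_of_mem hw'
                  have hjlt : j < i := by
                    have := hj; simp [List.length_take] at this; omega
                  have hjN : j < N.length := by omega
                  have hNj : N[j] = w := by rw [← hjw]; exact List.getElem_take.symm
                  exact hFirst j (by simpa using hjlt) (by simp [hNj, ← heq])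
                · obtain ⟨j, hj, hjw⟩ := List.getElem_of_mem hw'
                  have hjN : i + 1 + j < N.length := by
                    have := hj; simp [List.length_drop] at this; omega
                  have hNj : N[i + 1 + j] = w := by
                    rw [← hjw, List.getElem_drop]
                  have := List.pairwise_iff_getElem.mp hpw i (i + 1 + j) hiN hjN (by omega)
                  rw [hNj] at this; exact this
              simp [uncLexKey, Prod.Lex.lt_iff]; right; exact ⟨heq, hvlt⟩
          · -- tail strictly increasing
            apply unc_pairwise_lt_of_le_nodup (PySem.List.sorted_pairwise _ _)
            have hperm2 := (PySem.List.sorted_perm ((N.eraseIdx i).map fun v => (v, c v)) uncLexKey false).map uncLexKey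
            rw [List.Perm.nodup_iff hperm2, List.map_map]
            apply List.Nodup.map
            · intro a b hab
              have h2 := congrArg ofLex hab
              simp only [Function.comp, uncLexKey, ofLex_toLex, Prod.mk.injEq] at h2
              exact h2.2
            · exact List.Nodup.sublist (List.eraseIdx_sublist N i) hndN
      rw [hsort]
      simp [List.getElem?_eq_getElem hiN, hcNi]

theorem unc_main (pb : List Int) : uncirculated_numbers pb = uncirculated_numbers_alt pb := by
  -- A side
  have hcfun : (fun (s : List Int × List Int) p =>
      if p ∈ s.1 then s else (s.1 ++ [p], s.2 ++ [((PySem.List.count pb p : Nat) : Int)]))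
      = (fun (s : List Int × List Int) p =>
      if p ∈ s.1 then s else (s.1 ++ [p], s.2 ++ [((List.count p pb : Nat) : Int)])) := by
    funext s p; rw [PySem.List.count_eq]
  set s0 : List Int := PySem.List.sorted pb (fun x => x) with hs0
  have hph := unc_phase1 (fun p => ((List.count p pb : Nat) : Int)) s0 []
  simp only [List.map_nil] at hph
  set NA : List Int := s0.foldl PySem.Set.add [] with hNA
  have hNAof : NA = PySem.Set.ofList s0 := (PySem.Set.ofList_eq_foldl s0).symm
  have hpwNA : NA.Pairwise (· < ·) := by
    obtain ⟨t, hsub, he⟩ := unc_foldl_add_sublist s0 []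
    have hNt : NA = t := by rw [hNA, he]; simp
    have hle : t.Pairwise (fun a b => a ≤ b) :=
      List.Pairwise.sublist hsub (PySem.List.sorted_pairwise pb (fun x => x))
    have hnd : NA.Nodup := by rw [hNAof]; exact PySem.Set.nodup_ofList s0
    rw [hNt] at hnd ⊢
    exact (hle.and hnd).imp (fun h => lt_of_le_of_ne h.1 h.2)
  have hsel := unc_sel_spec (fun p => ((List.count p pb : Nat) : Int)) NA.length NA rfl hpwNA [] []
  simp only [List.nil_append] at hsel
  have hA : uncirculated_numbers pb =
      (((PySem.List.sorted (NA.map fun v => (v, ((List.count v pb : Nat) : Int))) uncLexKey).map Prod.fst).take 10,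
       ((PySem.List.sorted (NA.map fun v => (v, ((List.count v pb : Nat) : Int))) uncLexKey).map Prod.snd).take 10) := by
    show (PySem.List.slice _ none (some 10), PySem.List.slice _ none (some 10)) = _
    rw [unc_slice10, unc_slice10]
    rw [show ((PySem.List.sorted pb (fun x => x)).foldl
      (fun (s : List Int × List Int) p =>
        if p ∈ s.1 then s else (s.1 ++ [p], s.2 ++ [((PySem.List.count pb p : Nat) : Int)]))
      ([], [])) = (NA, NA.map (fun p => ((List.count p pb : Nat) : Int))) from by rw [hcfun]; exact hph]
    rw [hsel]
  -- B side
  have hcnt : (pb.foldl (fun d p => d.insert p (d.getD p 0 + 1)) PySem.Dict.empty)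
      = PySem.Dict.counter pb := rfl
  have hB : uncirculated_numbers_alt pb =
      (((PySem.List.sorted ((PySem.Set.ofList pb).map fun k => (k, ((List.count k pb : Nat) : Int))) uncLexKey).take 10).map Prod.fst,
       ((PySem.List.sorted ((PySem.Set.ofList pb).map fun k => (k, ((List.count k pb : Nat) : Int))) uncLexKey).take 10).map Prod.snd) := by
    show ((PySem.List.slice _ none (some 10)).map _, (PySem.List.slice _ none (some 10)).map _) = _
    rw [hcnt, unc_sorted2_eq, PySem.Dict.items_counter, unc_slice10]
  -- the two sorted lists coincide
  have hbase : NA.Perm (PySem.Set.ofList pb) := by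
    rw [(List.perm_ext_iff_of_nodup ?_ ?_)]
    · intro a
      rw [hNAof, PySem.Set.mem_ofList, PySem.Set.mem_ofList, hs0, PySem.List.mem_sorted]
    · rw [hNAof]; exact PySem.Set.nodup_ofList s0
    · exact PySem.Set.nodup_ofList pb
  have hsorteq : PySem.List.sorted (NA.map fun v => (v, ((List.count v pb : Nat) : Int))) uncLexKey
      = PySem.List.sorted ((PySem.Set.ofList pb).map fun k => (k, ((List.count k pb : Nat) : Int))) uncLexKey :=
    PySem.List.sorted_eq_sorted_of_perm _ _ _ unc_lexkey_inj (hbase.map _)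
  rw [hA, hB, hsorteq, List.map_take, List.map_take]

-- ===== VERDICT (by name: the statement is the Claim_ definition above) =====
theorem uncirculated_numbers_spec : Claim_equal_uncirculated_numbers := by
  intro pb _
  unfold Spec_uncirculated_numbers
  exact unc_main pb
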